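-- pv_equiv track=rewrite | github.com/PLeVasseur/opencode-project-agents | fls/reports/system-abi-variadic-tooling-restack-20260207T144017Z/integration-before.changelog_assistant.py | aggregate_entry_paragraph_buckets
-- ===== SOURCE A (Python) =====
-- from collections import defaultdict
--
-- CHANGE_TAG_ORDER = [
--     "paragraph-added",
--     "paragraph-removed",
--     "paragraph-changed",
--     "role-change",
--     "term-def-added",
--     "term-def-removed",
--     "term-ref-added",
--     "term-ref-removed",
--     "syntax-def-added",
--     "syntax-def-removed",
--     "syntax-ref-added",
--     "syntax-ref-removed",
--     "literal-change",
--     "list-structure-change",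
--     "section-added",
--     "section-removed",
--     "definition-relocated",
--     "normative-shift",
-- ]
--
-- def sorted_tags(tags):
--     seen = set(tags)
--     return [tag for tag in CHANGE_TAG_ORDER if tag in seen]
--
-- def sorted_tags_with_unknown(tags):
--     ordered = sorted_tags(tags)
--     known = set(ordered)
--     return ordered + sorted(tag for tag in set(tags) if tag not in known)
--
-- def aggregate_entry_paragraph_buckets(changes):
--     added = set()
--     removed = set()
--     changed_tags = defaultdict(set)
--
--     for change in changes:
--         paragraph_id = change.get("paragraph_id")
--         if not paragraph_id:
--             continue
--
--         change_type = change.get("type")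
--         if change_type == "paragraph_added":
--             added.add(paragraph_id)
--             continue
--         if change_type == "paragraph_removed":
--             removed.add(paragraph_id)
--             continue
--
--         tag = change.get("tag")
--         if tag:
--             changed_tags[paragraph_id].add(tag)
--
--     for paragraph_id in added | removed:
--         changed_tags.pop(paragraph_id, None)
--
--     changed = [
--         (paragraph_id, sorted_tags_with_unknown(tags))
--         for paragraph_id, tags in sorted(changed_tags.items())
--     ]
--     return sorted(added), sorted(removed), changed
-- ===== SOURCE B (Python) =====
-- CHANGE_TAG_ORDER = [
--     "paragraph-added",
--     "paragraph-removed",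
--     "paragraph-changed",
--     "role-change",
--     "term-def-added",
--     "term-def-removed",
--     "term-ref-added",
--     "term-ref-removed",
--     "syntax-def-added",
--     "syntax-def-removed",
--     "syntax-ref-added",
--     "syntax-ref-removed",
--     "literal-change",
--     "list-structure-change",
--     "section-added",
--     "section-removed",
--     "definition-relocated",
--     "normative-shift",
-- ]
--
-- _RANK = {tag: i for i, tag in enumerate(CHANGE_TAG_ORDER)}
-- _N = len(CHANGE_TAG_ORDER)
--
--
-- def _tag_key(tag):
--     # known tags sort by their position in CHANGE_TAG_ORDER, unknown tags after
--     # all known ones, alphabetically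
--     rank = _RANK.get(tag, _N)
--     return (rank, "" if rank < _N else tag)
--
--
-- def aggregate_entry_paragraph_buckets(changes):
--     # pass 1: collect the added / removed paragraph ids
--     added = set()
--     removed = set()
--     for change in changes:
--         paragraph_id = change.get("paragraph_id")
--         if paragraph_id:
--             change_type = change.get("type")
--             if change_type == "paragraph_added":
--                 added.add(paragraph_id)
--             elif change_type == "paragraph_removed":
--                 removed.add(paragraph_id)
--     excluded = added | removed
--
--     # pass 2: collect tags for the remaining paragraphs only (an added/removed
--     # paragraph never keeps tags, so no post-loop cleanup is needed; a change
--     # whose type is paragraph_added/paragraph_removed always has an excluded id)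
--     changed_tags = {}
--     for change in changes:
--         paragraph_id = change.get("paragraph_id")
--         if not paragraph_id or paragraph_id in excluded:
--             continue
--         tag = change.get("tag")
--         if tag:
--             changed_tags.setdefault(paragraph_id, set()).add(tag)
--
--     changed = [
--         (paragraph_id, sorted(tags, key=_tag_key))
--         for paragraph_id, tags in sorted(changed_tags.items())
--     ]
--     return sorted(added), sorted(removed), changed
-- ===== Notes on version B (the rewrite author's own statement) =====
-- stated objective: simpler
-- what changed: Two passes instead of one: first collect added/removed ids, then gather tags only for non-excluded paragraphs (so A's post-loop pop cleanup and its type checks in the tag branch disappear), and each tag list is produced by one keyed sort (rank in CHANGE_TAG_ORDER, then the tag itself) instead of A's filter-the-order-list-then-append-sorted-unknowns helper pair.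
import Mathlib
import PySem

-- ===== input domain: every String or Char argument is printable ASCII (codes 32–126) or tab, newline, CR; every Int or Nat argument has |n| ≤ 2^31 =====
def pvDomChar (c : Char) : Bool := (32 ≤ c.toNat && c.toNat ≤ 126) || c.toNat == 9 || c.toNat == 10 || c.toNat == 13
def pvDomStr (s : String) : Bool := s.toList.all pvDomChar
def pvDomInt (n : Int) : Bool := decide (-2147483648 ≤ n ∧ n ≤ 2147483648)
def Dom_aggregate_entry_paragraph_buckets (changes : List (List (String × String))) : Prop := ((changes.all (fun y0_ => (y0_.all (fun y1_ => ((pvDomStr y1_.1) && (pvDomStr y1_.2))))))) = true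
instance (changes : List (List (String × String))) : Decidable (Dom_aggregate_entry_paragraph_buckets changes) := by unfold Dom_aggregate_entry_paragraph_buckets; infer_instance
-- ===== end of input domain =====

-- B replaces A's single pass + post-loop pop cleanup by two passes (collect added/removed,
-- then tag only non-excluded paragraphs) and sorts each tag set by one rank key instead of
-- A's filter-the-order-list-then-append-sorted-unknowns helper pair; objective: simpler.

-- ===== PORT A =====
def CHANGE_TAG_ORDER : List String :=
  ["paragraph-added", "paragraph-removed", "paragraph-changed", "role-change",
   "term-def-added", "term-def-removed", "term-ref-added", "term-ref-removed",
   "syntax-def-added", "syntax-def-removed", "syntax-ref-added", "syntax-ref-removed",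
   "literal-change", "list-structure-change", "section-added", "section-removed",
   "definition-relocated", "normative-shift"]

-- change.get(k): the dict is an association list (first match wins)
def pvDictGet (change : List (String × String)) (k : String) : Option String :=
  (PySem.Dict.mk change).get? k

def sorted_tags (tags : List String) : List String :=
  let seen := PySem.Set.ofList tags
  CHANGE_TAG_ORDER.filter (fun tag => PySem.Set.contains seen tag)

def sorted_tags_with_unknown (tags : List String) : List String :=
  let ordered := sorted_tags tags
  let known := PySem.Set.ofList ordered
  ordered ++ PySem.List.sorted
    (List.filter (fun tag => !(PySem.Set.contains known tag)) (PySem.Set.ofList tags))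
    (fun t => t) false

-- one iteration of A's loop over changes; state = (added, removed, changed_tags)
def pvStepA (st : PySem.Set String × PySem.Set String × PySem.Dict String (PySem.Set String))
    (change : List (String × String)) :
    PySem.Set String × PySem.Set String × PySem.Dict String (PySem.Set String) :=
  match pvDictGet change "paragraph_id" with
  | none => st
  | some pid =>
    if pid == "" then st
    else
      let change_type := pvDictGet change "type"
      if change_type == some "paragraph_added" then (PySem.Set.add st.1 pid, st.2.1, st.2.2)
      else if change_type == some "paragraph_removed" then (st.1, PySem.Set.add st.2.1 pid, st.2.2)
      else
        match pvDictGet change "tag" with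
        | none => st
        | some tag =>
          if tag == "" then st
          else  -- changed_tags[pid].add(tag) on a defaultdict(set)
            (st.1, st.2.1, PySem.Dict.modify st.2.2 pid PySem.Set.empty (fun s => PySem.Set.add s tag))

def aggregate_entry_paragraph_buckets (changes : List (List (String × String))) :
    List String × List String × (List (String × List String)) :=
  let st := changes.foldl pvStepA (PySem.Set.empty, PySem.Set.empty, PySem.Dict.empty)
  let added := st.1
  let removed := st.2.1
  -- for paragraph_id in added | removed: changed_tags.pop(paragraph_id, None)
  let changed_tags := (PySem.Set.union added removed).foldl (fun d pid => d.erase pid) st.2.2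
  -- sorted(changed_tags.items()): keys are unique, so sorting by the key alone is exact
  let changed := (PySem.List.sorted changed_tags.items (fun p => p.1) false).map
      (fun p => (p.1, sorted_tags_with_unknown p.2))
  (PySem.List.sorted added (fun x => x) false, PySem.List.sorted removed (fun x => x) false, changed)

-- ===== PORT B =====
-- _RANK = {tag: i for i, tag in enumerate(CHANGE_TAG_ORDER)}
def pvRANK : PySem.Dict String Int :=
  (PySem.List.enumerate CHANGE_TAG_ORDER).foldl (fun d p => d.insert p.2 p.1) PySem.Dict.empty

def pvN : Int := PySem.List.len CHANGE_TAG_ORDER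

-- _tag_key(tag) = (rank, "" if rank < _N else tag)
def pvTagKey (tag : String) : Int × String :=
  let rank := pvRANK.getD tag pvN
  (rank, if rank < pvN then "" else tag)

-- pass 1: one iteration collecting the added/removed ids
def pvStepB1 (st : PySem.Set String × PySem.Set String) (change : List (String × String)) :
    PySem.Set String × PySem.Set String :=
  match pvDictGet change "paragraph_id" with
  | none => st
  | some pid =>
    if pid == "" then st
    else
      let change_type := pvDictGet change "type"
      if change_type == some "paragraph_added" then (PySem.Set.add st.1 pid, st.2)
      else if change_type == some "paragraph_removed" then (st.1, PySem.Set.add st.2 pid)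
      else st

-- pass 2: one iteration collecting tags of non-excluded paragraphs
def pvStepB2 (excluded : PySem.Set String) (d : PySem.Dict String (PySem.Set String))
    (change : List (String × String)) : PySem.Dict String (PySem.Set String) :=
  match pvDictGet change "paragraph_id" with
  | none => d
  | some pid =>
    if pid == "" || PySem.Set.contains excluded pid then d
    else
      match pvDictGet change "tag" with
      | none => d
      | some tag =>
        if tag == "" then d
        else  -- changed_tags.setdefault(pid, set()).add(tag)
          PySem.Dict.modify d pid PySem.Set.empty (fun s => PySem.Set.add s tag)

def aggregate_entry_paragraph_buckets_alt (changes : List (List (String × String))) :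
    List String × List String × (List (String × List String)) :=
  let st := changes.foldl pvStepB1 (PySem.Set.empty, PySem.Set.empty)
  let excluded := PySem.Set.union st.1 st.2
  let changed_tags := changes.foldl (pvStepB2 excluded) PySem.Dict.empty
  -- sorted(changed_tags.items()): keys are unique, so sorting by the key alone is exact;
  -- sorted(tags, key=_tag_key): a 2-tuple key, hence sorted2
  let changed := (PySem.List.sorted changed_tags.items (fun p => p.1) false).map
      (fun p => (p.1, PySem.List.sorted2 p.2 (fun t => (pvTagKey t).1) (fun t => (pvTagKey t).2) false))
  (PySem.List.sorted st.1 (fun x => x) false, PySem.List.sorted st.2 (fun x => x) false, changed)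

-- ===== PRECONDITION & SPEC =====
def Spec_aggregate_entry_paragraph_buckets (changes : List (List (String × String))) (out : List String × List String × (List (String × List String))) : Prop := out = aggregate_entry_paragraph_buckets_alt changes
instance (changes : List (List (String × String))) (out : List String × List String × (List (String × List String))) : Decidable (Spec_aggregate_entry_paragraph_buckets changes out) := by unfold Spec_aggregate_entry_paragraph_buckets; infer_instance

-- ===== CLAIM (what is proved, stated in full; the proofs are below) =====
def Claim_equal_aggregate_entry_paragraph_buckets : Prop := ∀ (changes : List (List (String × String))), Dom_aggregate_entry_paragraph_buckets changes → Spec_aggregate_entry_paragraph_buckets changes (aggregate_entry_paragraph_buckets changes)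

-- ===== LEMMAS AND PROOFS =====
theorem pv_step_shape (a r : PySem.Set String) (d : PySem.Dict String (PySem.Set String))
    (c : List (String × String)) :
    pvStepA (a, r, d) c = ((pvStepB1 (a, r) c).1, (pvStepB1 (a, r) c).2, (pvStepA (a, r, d) c).2.2) := by
  unfold pvStepA pvStepB1
  cases pvDictGet c "paragraph_id" with
  | none => rfl
  | some pid =>
    simp only
    split_ifs
    all_goals try rfl
    all_goals cases pvDictGet c "tag" with
      | none => rfl
      | some tag => simp only; split_ifs <;> rfl

theorem pv_pass1_agree (l : List (List (String × String)))
    (a r : PySem.Set String) (d : PySem.Dict String (PySem.Set String)) :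
    (l.foldl pvStepA (a, r, d)).1 = (l.foldl pvStepB1 (a, r)).1 ∧
    (l.foldl pvStepA (a, r, d)).2.1 = (l.foldl pvStepB1 (a, r)).2 := by
  induction l generalizing a r d with
  | nil => exact ⟨rfl, rfl⟩
  | cons c l ih =>
    simp only [List.foldl_cons]
    rw [pv_step_shape]
    rcases h : pvStepB1 (a, r) c with ⟨a', r'⟩
    exact ih a' r' _
theorem pv_stepB1_mono (st : PySem.Set String × PySem.Set String) (c : List (String × String))
    (x : String) :
    (x ∈ st.1 → x ∈ (pvStepB1 st c).1) ∧ (x ∈ st.2 → x ∈ (pvStepB1 st c).2) := by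
  unfold pvStepB1
  cases pvDictGet c "paragraph_id" with
  | none => exact ⟨id, id⟩
  | some pid =>
    simp only
    split_ifs <;> simp [PySem.Set.mem_add] <;> tauto

theorem pv_pass1_mono (l : List (List (String × String))) (a r : PySem.Set String) (x : String) :
    (x ∈ a → x ∈ (l.foldl pvStepB1 (a, r)).1) ∧ (x ∈ r → x ∈ (l.foldl pvStepB1 (a, r)).2) := by
  induction l generalizing a r with
  | nil => exact ⟨id, id⟩
  | cons c l ih =>
    simp only [List.foldl_cons]
    rcases h : pvStepB1 (a, r) c with ⟨a', r'⟩
    have hm := pv_stepB1_mono (a, r) c x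
    rw [h] at hm
    exact ⟨fun hx => (ih a' r').1 (hm.1 hx), fun hx => (ih a' r').2 (hm.2 hx)⟩

theorem pv_pass1_capture (l : List (List (String × String))) (a r : PySem.Set String)
    (c : List (String × String)) (hc : c ∈ l) (pid : String)
    (hpid : pvDictGet c "paragraph_id" = some pid) (hne : ¬ (pid == "") = true) :
    (pvDictGet c "type" = some "paragraph_added" → pid ∈ (l.foldl pvStepB1 (a, r)).1) ∧
    (pvDictGet c "type" = some "paragraph_removed" → pid ∈ (l.foldl pvStepB1 (a, r)).2) := by
  induction l generalizing a r with
  | nil => cases hc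
  | cons c0 l ih =>
    simp only [List.foldl_cons]
    rcases List.mem_cons.mp hc with heq | hmem
    · subst heq
      constructor
      · intro hty
        have : (pvStepB1 (a, r) c).1 = PySem.Set.add a pid := by
          unfold pvStepB1; rw [hpid]; simp only [hne, hty]; simp
        rw [show pvStepB1 (a, r) c = ((pvStepB1 (a, r) c).1, (pvStepB1 (a, r) c).2) from rfl, this]
        exact (pv_pass1_mono l _ _ pid).1 (by simp [PySem.Set.mem_add])
      · intro hty
        have : (pvStepB1 (a, r) c).2 = PySem.Set.add r pid := by
          unfold pvStepB1; rw [hpid]; simp only [hne, hty]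
          have : ¬ ((some "paragraph_removed" : Option String) == some "paragraph_added") = true := by decide
          simp
        rw [show pvStepB1 (a, r) c = ((pvStepB1 (a, r) c).1, (pvStepB1 (a, r) c).2) from rfl, this]
        exact (pv_pass1_mono l _ _ pid).2 (by simp [PySem.Set.mem_add])
    · exact ih _ _ hmem

theorem pv_erase_fold (excl : List String) (d : PySem.Dict String (PySem.Set String)) :
    (excl.foldl (fun d pid => d.erase pid) d).items
      = d.items.filter (fun p => !(excl.contains p.1)) := by
  induction excl generalizing d with
  | nil => simp
  | cons k excl ih =>
    simp only [List.foldl_cons]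
    rw [ih]
    simp only [PySem.Dict.erase, List.filter_filter]
    apply List.filter_congr
    intro p _
    simp [Bool.not_or, Bool.and_comm, beq_eq_decide]
theorem pv_not_mem_of_contains_false {s : PySem.Set String} {x : String}
    (h : PySem.Set.contains s x = false) : x ∉ s := by
  intro hm
  rw [(PySem.Set.contains_iff s x).mpr hm] at h
  cases h

theorem pv_mem_of_contains_true {s : PySem.Set String} {x : String}
    (h : PySem.Set.contains s x = true) : x ∈ s :=
  (PySem.Set.contains_iff s x).mp h

-- pred notation: keep entries whose key is not excluded
theorem pv_find?_filter (l : List (String × PySem.Set String)) (excl : PySem.Set String)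
    (pid : String) (h : PySem.Set.contains excl pid = false) :
    List.find? (fun p => p.1 == pid) (l.filter (fun p => !(PySem.Set.contains excl p.1)))
      = List.find? (fun p => p.1 == pid) l := by
  rw [List.find?_filter]
  congr 1
  funext p
  by_cases hp : p.1 = pid
  · subst hp; simp [pv_not_mem_of_contains_false h]
  · simp [hp]

theorem pv_get?_rel (d dB : PySem.Dict String (PySem.Set String)) (excl : PySem.Set String)
    (hrel : dB.items = d.items.filter (fun p => !(PySem.Set.contains excl p.1)))
    (pid : String) (h : PySem.Set.contains excl pid = false) :
    dB.get? pid = d.get? pid := by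
  simp only [PySem.Dict.get?, hrel, pv_find?_filter _ _ _ h]

theorem pv_contains_rel (d dB : PySem.Dict String (PySem.Set String)) (excl : PySem.Set String)
    (hrel : dB.items = d.items.filter (fun p => !(PySem.Set.contains excl p.1)))
    (pid : String) (h : PySem.Set.contains excl pid = false) :
    dB.contains pid = d.contains pid := by
  rw [PySem.Dict.contains_eq_isSome_get?, PySem.Dict.contains_eq_isSome_get?,
    pv_get?_rel d dB excl hrel pid h]

theorem pv_filter_insert_not_excl (d dB : PySem.Dict String (PySem.Set String))
    (excl : PySem.Set String)
    (hrel : dB.items = d.items.filter (fun p => !(PySem.Set.contains excl p.1)))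
    (pid : String) (h : PySem.Set.contains excl pid = false) (v : PySem.Set String) :
    ((d.insert pid v).items).filter (fun p => !(PySem.Set.contains excl p.1))
      = (dB.insert pid v).items := by
  by_cases hd : d.contains pid = true
  · rw [PySem.Dict.items_insert_of_contains _ _ hd,
      PySem.Dict.items_insert_of_contains _ _ (by rw [pv_contains_rel d dB excl hrel pid h]; exact hd)]
    rw [List.filter_map, hrel]
    congr 1
    apply List.filter_congr
    intro p _
    by_cases hp : p.1 = pid
    · simp [Function.comp, hp, pv_not_mem_of_contains_false h]
    · simp [Function.comp, hp]
  · rw [PySem.Dict.items_insert_of_not_contains _ _ (by simpa using hd),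
      PySem.Dict.items_insert_of_not_contains _ _
        (by rw [pv_contains_rel d dB excl hrel pid h]; simpa using hd)]
    rw [List.filter_append, hrel]
    simp [pv_not_mem_of_contains_false h]

theorem pv_filter_insert_excl (d : PySem.Dict String (PySem.Set String))
    (excl : PySem.Set String) (pid : String) (h : PySem.Set.contains excl pid = true)
    (v : PySem.Set String) :
    ((d.insert pid v).items).filter (fun p => !(PySem.Set.contains excl p.1))
      = d.items.filter (fun p => !(PySem.Set.contains excl p.1)) := by
  by_cases hd : d.contains pid = true
  · rw [PySem.Dict.items_insert_of_contains _ _ hd, List.filter_map]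
    rw [show List.filter ((fun p => !(PySem.Set.contains excl p.1)) ∘
          (fun p => if p.1 == pid then (pid, v) else p)) d.items
        = List.filter (fun p => !(PySem.Set.contains excl p.1)) d.items from
      List.filter_congr (by
        intro p _
        by_cases hp : p.1 = pid
        · simp [Function.comp, hp, pv_mem_of_contains_true h]
        · simp [Function.comp, hp])]
    have hid : ∀ p ∈ List.filter (fun p => !(PySem.Set.contains excl p.1)) d.items,
        (if (p.1 == pid) = true then (pid, v) else p) = p := by
      intro p hp
      have hmem := (List.mem_filter.mp hp).2
      have hne : p.1 ≠ pid := by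
        intro hEq
        rw [hEq, h] at hmem
        simp at hmem
      simp [hne]
    rw [List.map_congr_left hid]; simp
  · rw [PySem.Dict.items_insert_of_not_contains _ _ (by simpa using hd), List.filter_append]
    simp [pv_mem_of_contains_true h]
theorem pv_dict_rel (l : List (List (String × String))) (excl : PySem.Set String)
    (a r : PySem.Set String) (d dB : PySem.Dict String (PySem.Set String))
    (hrel : dB.items = d.items.filter (fun p => !(PySem.Set.contains excl p.1)))
    (hcap : ∀ c ∈ l, ∀ pid, pvDictGet c "paragraph_id" = some pid → ¬ (pid == "") = true →
      (pvDictGet c "type" = some "paragraph_added" ∨ pvDictGet c "type" = some "paragraph_removed") →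
      PySem.Set.contains excl pid = true) :
    (l.foldl (pvStepB2 excl) dB).items
      = ((l.foldl pvStepA (a, r, d)).2.2).items.filter (fun p => !(PySem.Set.contains excl p.1)) := by
  induction l generalizing a r d dB with
  | nil => simpa using hrel
  | cons c l ih =>
    have hcap' : ∀ c' ∈ l, ∀ pid, pvDictGet c' "paragraph_id" = some pid → ¬ (pid == "") = true →
        (pvDictGet c' "type" = some "paragraph_added" ∨ pvDictGet c' "type" = some "paragraph_removed") →
        PySem.Set.contains excl pid = true := by
      intro c' hc'; exact hcap c' (List.mem_cons_of_mem _ hc')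
    simp only [List.foldl_cons]
    cases hpid : pvDictGet c "paragraph_id" with
    | none =>
      simp only [pvStepA, pvStepB2, hpid]
      exact ih a r d dB hrel hcap'
    | some pid =>
      by_cases hemp : (pid == "") = true
      · simp only [pvStepA, pvStepB2, hpid, hemp, Bool.true_or, if_pos]
        exact ih a r d dB hrel hcap'
      · have hemp' : (pid == "") = false := by simpa using hemp
        by_cases hty1 : (pvDictGet c "type" == some "paragraph_added") = true
        · have hexcl : PySem.Set.contains excl pid = true :=
            hcap c (List.mem_cons_self) pid hpid hemp (Or.inl (by simpa using hty1))
          simp only [pvStepA, pvStepB2, hpid, hemp', hexcl, Bool.false_or, hty1,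
            Bool.false_eq_true, if_false, if_true]
          exact ih _ _ d dB hrel hcap'
        · have hty1' : (pvDictGet c "type" == some "paragraph_added") = false := by simpa using hty1
          by_cases hty2 : (pvDictGet c "type" == some "paragraph_removed") = true
          · have hexcl : PySem.Set.contains excl pid = true :=
              hcap c (List.mem_cons_self) pid hpid hemp (Or.inr (by simpa using hty2))
            simp only [pvStepA, pvStepB2, hpid, hemp', hexcl, Bool.false_or, hty1', hty2,
              Bool.false_eq_true, if_false, if_true]
            exact ih _ _ d dB hrel hcap'
          · have hty2' : (pvDictGet c "type" == some "paragraph_removed") = false := by simpa using hty2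
            cases htag : pvDictGet c "tag" with
            | none =>
              simp only [pvStepA, pvStepB2, hpid, hemp', hty1', hty2', htag,
                Bool.false_eq_true, if_false]
              by_cases hexcl : PySem.Set.contains excl pid = true
              · simp only [hexcl, Bool.false_or, if_true]
                exact ih a r d dB hrel hcap'
              · have hexcl' : PySem.Set.contains excl pid = false := by simpa using hexcl
                simp only [hexcl', Bool.false_or, Bool.false_eq_true, if_false]
                exact ih a r d dB hrel hcap'
            | some tag =>
              by_cases htag0 : (tag == "") = true
              · simp only [pvStepA, pvStepB2, hpid, hemp', hty1', hty2', htag, htag0,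
                  Bool.false_eq_true, if_false, if_true]
                by_cases hexcl : PySem.Set.contains excl pid = true
                · simp only [hexcl, Bool.false_or, if_true]
                  exact ih a r d dB hrel hcap'
                · have hexcl' : PySem.Set.contains excl pid = false := by simpa using hexcl
                  simp only [hexcl', Bool.false_or, Bool.false_eq_true, if_false]
                  exact ih a r d dB hrel hcap'
              · have htag0' : (tag == "") = false := by simpa using htag0
                by_cases hexcl : PySem.Set.contains excl pid = true
                · simp only [pvStepA, pvStepB2, hpid, hemp', hty1', hty2', htag, htag0',
                    hexcl, Bool.false_or, Bool.false_eq_true, if_false, if_true]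
                  apply ih _ _ _ dB _ hcap'
                  rw [hrel, PySem.Dict.modify]
                  exact (pv_filter_insert_excl d excl pid hexcl _).symm
                · have hexcl' : PySem.Set.contains excl pid = false := by simpa using hexcl
                  simp only [pvStepA, pvStepB2, hpid, hemp', hty1', hty2', htag, htag0',
                    hexcl', Bool.false_or, Bool.false_eq_true, if_false]
                  apply ih _ _ _ _ _ hcap'
                  have hv : dB.getD pid PySem.Set.empty = d.getD pid PySem.Set.empty := by
                    rw [PySem.Dict.getD_eq_get?_getD, PySem.Dict.getD_eq_get?_getD,
                      pv_get?_rel d dB excl hrel pid hexcl']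
                  rw [PySem.Dict.modify, PySem.Dict.modify, hv]
                  exact (pv_filter_insert_not_excl d dB excl hrel pid hexcl' _).symm
theorem pv_values_nodup (l : List (List (String × String))) (a r : PySem.Set String)
    (d : PySem.Dict String (PySem.Set String)) (h : ∀ p ∈ d.items, p.2.Nodup) :
    ∀ p ∈ ((l.foldl pvStepA (a, r, d)).2.2).items, p.2.Nodup := by
  induction l generalizing a r d with
  | nil => simpa using h
  | cons c l ih =>
    simp only [List.foldl_cons]
    cases hpid : pvDictGet c "paragraph_id" with
    | none => simp only [pvStepA, hpid]; exact ih a r d h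
    | some pid =>
      by_cases hemp : (pid == "") = true
      · simp only [pvStepA, hpid, hemp, if_pos]
        exact ih a r d h
      · have hemp' : (pid == "") = false := by simpa using hemp
        by_cases hty1 : (pvDictGet c "type" == some "paragraph_added") = true
        · simp only [pvStepA, hpid, hemp', hty1, Bool.false_eq_true, if_false, if_true]
          exact ih _ _ d h
        · have hty1' : (pvDictGet c "type" == some "paragraph_added") = false := by simpa using hty1
          by_cases hty2 : (pvDictGet c "type" == some "paragraph_removed") = true
          · simp only [pvStepA, hpid, hemp', hty1', hty2, Bool.false_eq_true, if_false, if_true]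
            exact ih _ _ d h
          · have hty2' : (pvDictGet c "type" == some "paragraph_removed") = false := by simpa using hty2
            cases htag : pvDictGet c "tag" with
            | none =>
              simp only [pvStepA, hpid, hemp', hty1', hty2', htag, Bool.false_eq_true, if_false]
              exact ih a r d h
            | some tag =>
              by_cases htag0 : (tag == "") = true
              · simp only [pvStepA, hpid, hemp', hty1', hty2', htag, htag0, Bool.false_eq_true,
                  if_false, if_true]
                exact ih a r d h
              · have htag0' : (tag == "") = false := by simpa using htag0
                simp only [pvStepA, hpid, hemp', hty1', hty2', htag, htag0', Bool.false_eq_true,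
                  if_false]
                apply ih
                intro p hp
                rw [PySem.Dict.modify] at hp
                have hbase : (d.getD pid PySem.Set.empty).Nodup := by
                  rw [PySem.Dict.getD_eq_get?_getD]
                  cases hq : d.get? pid with
                  | none => exact List.nodup_nil
                  | some w =>
                    exact h _ (PySem.Dict.mem_items_of_get?_eq_some _ hq)
                rcases (PySem.Dict.mem_items_insert _ _ _ _).mp hp with hEq | ⟨hmem, _⟩
                · rw [hEq]
                  exact PySem.Set.nodup_add _ _ hbase
                · exact h _ hmem
theorem pv_sorted2_eq_sorted_lex {α : Type} (xs : List α) (k1 : α → Int) (k2 : α → String) :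
    PySem.List.sorted2 xs k1 k2 false
      = PySem.List.sorted xs (fun x => toLex (k1 x, k2 x)) false := by
  simp only [PySem.List.sorted2, PySem.List.sorted]
  congr 1
  funext acc x
  congr 1
  funext a b
  by_cases h1 : k1 a < k1 b
  · simp [h1, Prod.Lex.lt_iff]
  · by_cases h2 : k1 b < k1 a
    · have hne : ¬ k1 a = k1 b := by omega
      simp [h1, h2, hne, Prod.Lex.lt_iff]
    · have heq : k1 a = k1 b := by omega
      simp [heq, Prod.Lex.lt_iff, String.lt_iff_toList_lt]

theorem pv_rank_keys : pvRANK.keys = CHANGE_TAG_ORDER := by decide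

theorem pv_rank_unknown (t : String) (h : t ∉ CHANGE_TAG_ORDER) : pvRANK.getD t pvN = pvN := by
  apply PySem.Dict.getD_of_not_contains
  rw [PySem.Dict.contains_eq_decide_mem_keys, pv_rank_keys]
  simpa using h

theorem pv_rank_pairwise :
    CHANGE_TAG_ORDER.Pairwise (fun s t => pvRANK.getD s pvN < pvRANK.getD t pvN) := by
  decide

theorem pv_rank_lt (t : String) (h : t ∈ CHANGE_TAG_ORDER) : pvRANK.getD t pvN < pvN := by
  have hall : CHANGE_TAG_ORDER.all (fun t => decide (pvRANK.getD t pvN < pvN)) = true := by decide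
  simpa using List.all_eq_true.mp hall t h
theorem pv_order_nodup : CHANGE_TAG_ORDER.Nodup := by decide

theorem pv_key_lt_of_rank_lt (a b : String)
    (h : pvRANK.getD a pvN < pvRANK.getD b pvN) :
    (fun t => toLex ((pvTagKey t).1, (pvTagKey t).2)) a
      < (fun t => toLex ((pvTagKey t).1, (pvTagKey t).2)) b := by
  simp only [Prod.Lex.lt_iff]
  left
  simpa [pvTagKey] using h

theorem pv_key_unknown (t : String) (h : t ∉ CHANGE_TAG_ORDER) :
    pvTagKey t = (pvN, t) := by
  have hr := pv_rank_unknown t h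
  simp [pvTagKey, hr]

theorem pv_tags_eq (S : List String) (hS : S.Nodup) :
    sorted_tags_with_unknown S
      = PySem.List.sorted2 S (fun t => (pvTagKey t).1) (fun t => (pvTagKey t).2) false := by
  rw [pv_sorted2_eq_sorted_lex]
  have hofS : PySem.Set.ofList S = S := PySem.Set.ofList_eq_self_of_nodup S hS
  unfold sorted_tags_with_unknown sorted_tags
  simp only [hofS]
  set K := CHANGE_TAG_ORDER.filter (fun t => PySem.Set.contains S t) with hK
  have hKnodup : K.Nodup := pv_order_nodup.filter _
  have hofK : PySem.Set.ofList K = K := PySem.Set.ofList_eq_self_of_nodup K hKnodup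
  simp only [hofK]
  set U := PySem.List.sorted (S.filter (fun t => !(PySem.Set.contains K t))) (fun t => t) false
    with hU
  -- membership characterizations
  have hmemK : ∀ t, t ∈ K ↔ t ∈ CHANGE_TAG_ORDER ∧ t ∈ S := by
    intro t
    simp [hK, List.mem_filter]
  have hmemU : ∀ t, t ∈ U ↔ t ∈ S ∧ t ∉ CHANGE_TAG_ORDER := by
    intro t
    rw [hU, PySem.List.mem_sorted, List.mem_filter]
    constructor
    · rintro ⟨htS, hnc⟩
      refine ⟨htS, fun hto => ?_⟩
      rw [(PySem.Set.contains_iff K t).mpr ((hmemK t).mpr ⟨hto, htS⟩)] at hnc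
      cases hnc
    · rintro ⟨htS, hto⟩
      exact ⟨htS, by simpa using (show t ∉ K from fun hk => hto ((hmemK t).mp hk).1)⟩
  -- permutation
  have hperm : (K ++ U).Perm S := by
    have h1 : K.Perm (S.filter (fun t => CHANGE_TAG_ORDER.contains t)) := by
      rw [List.perm_ext_iff_of_nodup hKnodup (hS.filter _)]
      intro t
      rw [hmemK, List.mem_filter]
      simp [and_comm]
    have h2 : U.Perm (S.filter (fun t => !(CHANGE_TAG_ORDER.contains t))) := by
      have hnd : U.Nodup := by
        refine (PySem.List.sorted_perm _ _ _).nodup_iff.mpr ?_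
        exact hS.filter _
      rw [List.perm_ext_iff_of_nodup hnd (hS.filter _)]
      intro t
      rw [hmemU, List.mem_filter]
      simp
    exact (h1.append h2).trans (List.filter_append_perm _ S)
  -- pairwise strict key order
  have hpair : (K ++ U).Pairwise
      (fun a b => (fun t => toLex ((pvTagKey t).1, (pvTagKey t).2)) a
        < (fun t => toLex ((pvTagKey t).1, (pvTagKey t).2)) b) := by
    rw [List.pairwise_append]
    refine ⟨?_, ?_, ?_⟩
    · have hp : K.Pairwise (fun s t => pvRANK.getD s pvN < pvRANK.getD t pvN) :=
        pv_rank_pairwise.sublist (List.filter_sublist)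
      exact hp.imp (fun h => pv_key_lt_of_rank_lt _ _ h)
    · have hle : U.Pairwise (fun a b => a ≤ b) := PySem.List.sorted_pairwise _ _
      have hnd : U.Nodup := by
        refine (PySem.List.sorted_perm _ _ _).nodup_iff.mpr ?_
        exact hS.filter _
      have hlt : U.Pairwise (fun a b => a < b) :=
        (hle.and hnd).imp (fun ⟨h1, h2⟩ => lt_of_le_of_ne h1 h2)
      refine hlt.imp_of_mem ?_
      intro a b ha hb hab
      have hka := pv_key_unknown a ((hmemU a).mp ha).2
      have hkb := pv_key_unknown b ((hmemU b).mp hb).2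
      simp only [Prod.Lex.lt_iff, hka, hkb]
      right
      exact ⟨rfl, hab⟩
    · intro a ha b hb
      apply pv_key_lt_of_rank_lt
      have h1 : pvRANK.getD a pvN < pvN := pv_rank_lt a ((hmemK a).mp ha).1
      have h2 : pvRANK.getD b pvN = pvN := pv_rank_unknown b ((hmemU b).mp hb).2
      omega
  exact (PySem.List.sorted_eq_of_perm_of_pairwise_lt S (K ++ U) _ hperm hpair).symm

-- ===== VERDICT (by name: the statement is the Claim_ definition above) =====
theorem aggregate_entry_paragraph_buckets_spec : Claim_equal_aggregate_entry_paragraph_buckets := by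
  intro changes _hdom
  unfold Spec_aggregate_entry_paragraph_buckets
  simp only [aggregate_entry_paragraph_buckets, aggregate_entry_paragraph_buckets_alt]
  set stA := changes.foldl pvStepA (PySem.Set.empty, PySem.Set.empty, PySem.Dict.empty) with hstA
  set stB := changes.foldl pvStepB1 (PySem.Set.empty, PySem.Set.empty) with hstB
  obtain ⟨ha, hr⟩ := pv_pass1_agree changes PySem.Set.empty PySem.Set.empty PySem.Dict.empty
  rw [← hstA, ← hstB] at ha hr
  set excl := PySem.Set.union stB.1 stB.2 with hexcl
  have hexcl_eq : PySem.Set.union stA.1 stA.2.1 = excl := by rw [ha, hr]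
  have hcap : ∀ c ∈ changes, ∀ pid, pvDictGet c "paragraph_id" = some pid → ¬ (pid == "") = true →
      (pvDictGet c "type" = some "paragraph_added" ∨ pvDictGet c "type" = some "paragraph_removed") →
      PySem.Set.contains excl pid = true := by
    intro c hc pid hpid hne hty
    apply (PySem.Set.contains_iff _ _).mpr
    rcases hty with h | h
    · exact (PySem.Set.mem_union _ _ _).mpr
        (Or.inl ((pv_pass1_capture changes _ _ c hc pid hpid hne).1 h))
    · exact (PySem.Set.mem_union _ _ _).mpr
        (Or.inr ((pv_pass1_capture changes _ _ c hc pid hpid hne).2 h))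
  have hrelB := pv_dict_rel changes excl PySem.Set.empty PySem.Set.empty
      PySem.Dict.empty PySem.Dict.empty rfl hcap
  rw [← hstA] at hrelB
  have hitems : ((PySem.Set.union stA.1 stA.2.1).foldl (fun d pid => d.erase pid) stA.2.2).items
      = (changes.foldl (pvStepB2 excl) PySem.Dict.empty).items := by
    rw [hexcl_eq, pv_erase_fold, hrelB]
    exact List.filter_congr (fun p _ => by simp)
  have hnodup : ∀ p ∈ (stA.2.2).items, p.2.Nodup := by
    rw [hstA]
    exact pv_values_nodup changes _ _ _ (by intro p hp; simp [PySem.Dict.empty] at hp)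
  refine Prod.ext ?_ (Prod.ext ?_ ?_)
  · simp only [ha]
  · simp only [hr]
  · simp only []
    rw [hitems]
    apply List.map_congr_left
    intro p hp
    have hpmem : p ∈ (changes.foldl (pvStepB2 excl) PySem.Dict.empty).items :=
      (PySem.List.mem_sorted _ _ _ _).mp hp
    rw [hrelB] at hpmem
    have hpn : p.2.Nodup := hnodup p (List.mem_filter.mp hpmem).1
    rw [pv_tags_eq p.2 hpn]
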